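-- pv_equiv track=rewrite | github.com/kcaracozza-creator/Nexus-V4 | nexus_v2/ai/ai_content_creation.py | is_readable
-- ===== SOURCE A (Python) =====
-- def is_readable(name):
--     """Check if name is easily readable"""
--     # Simple heuristic: avoid too many consecutive consonants
--     consonants = 'bcdfghjklmnpqrstvwxyzBCDFGHJKLMNPQRSTVWXYZ'
--     consecutive = 0
--     max_consecutive = 0
--
--     for char in name:
--         if char in consonants:
--             consecutive += 1
--             max_consecutive = max(max_consecutive, consecutive)
--         else:
--             consecutive = 0
--
--     return max_consecutive <= 3
-- ===== SOURCE B (Python) =====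
-- def is_readable(name):
--     """Check if name is easily readable"""
--     # Run-skipping scan: jump over each consonant run, fail early if a run exceeds 3.
--     consonants = set('bcdfghjklmnpqrstvwxyzBCDFGHJKLMNPQRSTVWXYZ')
--     i, n = 0, len(name)
--     while i < n:
--         if name[i] in consonants:
--             j = i
--             while j < n and name[j] in consonants:
--                 j += 1
--             if j - i > 3:
--                 return False
--             i = j
--         else:
--             i += 1
--     return True
-- ===== Notes on version B (the rewrite author's own statement) =====
-- stated objective: alternative
-- what changed: Replaced the single-pass running-counter/running-max fold with a run-skipping scan that locates each maximal consonant run and returns False early when a run exceeds 3.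
import Mathlib
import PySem

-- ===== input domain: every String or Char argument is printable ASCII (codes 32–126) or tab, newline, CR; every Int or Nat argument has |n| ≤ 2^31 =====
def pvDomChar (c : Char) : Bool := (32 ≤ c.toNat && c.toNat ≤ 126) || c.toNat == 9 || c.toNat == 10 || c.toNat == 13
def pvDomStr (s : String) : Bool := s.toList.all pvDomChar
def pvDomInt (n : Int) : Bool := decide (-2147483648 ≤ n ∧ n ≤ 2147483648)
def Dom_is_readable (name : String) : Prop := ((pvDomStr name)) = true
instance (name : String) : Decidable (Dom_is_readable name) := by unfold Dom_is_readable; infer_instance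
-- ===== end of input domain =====

-- ===== PORT A =====
-- B changes the scan strategy (run-skipping with early exit vs running counter); return value only, no speed claim.
def pvConsonants : List Char := "bcdfghjklmnpqrstvwxyzBCDFGHJKLMNPQRSTVWXYZ".toList

def pvStepA (st : Nat × Nat) (ch : Char) : Nat × Nat :=
  if pvConsonants.contains ch then (st.1 + 1, Nat.max st.2 (st.1 + 1)) else (0, st.2)

def is_readable (name : String) : Bool :=
  let st := name.toList.foldl pvStepA (0, 0)
  decide (st.2 ≤ 3)

-- ===== PORT B =====
def pvIsCons (ch : Char) : Bool := pvConsonants.contains ch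

-- run-skipping scan of Source B: the inner while is takeWhile/dropWhile over the rest of the list
def pvCheckRuns : List Char → Bool
  | [] => true
  | c :: rest =>
    if pvIsCons c then
      let run := (c :: rest).takeWhile pvIsCons
      if 3 < run.length then false
      else pvCheckRuns ((c :: rest).dropWhile pvIsCons)
    else pvCheckRuns rest
termination_by l => l.length
decreasing_by
  · simp only [List.dropWhile_cons, *]
    exact Nat.lt_succ_of_le (List.length_dropWhile_le pvIsCons rest)
  · simp

def is_readable_alt (name : String) : Bool := pvCheckRuns name.toList

-- ===== PRECONDITION & SPEC =====
def Spec_is_readable (name : String) (out : Bool) : Prop := out = is_readable_alt name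
instance (name : String) (out : Bool) : Decidable (Spec_is_readable name out) := by unfold Spec_is_readable; infer_instance

-- ===== CLAIM (what is proved, stated in full; the proofs are below) =====
def Claim_equal_is_readable : Prop := ∀ (name : String), Dom_is_readable name → Spec_is_readable name (is_readable name)

-- ===== LEMMAS AND PROOFS =====
lemma pvRun_fold (t : List Char) (ht : ∀ x ∈ t, pvIsCons x = true) :
    ∀ c m : Nat, c ≤ m → t.foldl pvStepA (c, m) = (c + t.length, Nat.max m (c + t.length)) := by
  induction t with
  | nil => intro c m hcm; simp [Nat.max_eq_left hcm]
  | cons x t' ih =>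
    intro c m hcm
    have hx : pvIsCons x = true := ht x (List.mem_cons_self)
    have ht' : ∀ y ∈ t', pvIsCons y = true := fun y hy => ht y (List.mem_cons_of_mem _ hy)
    simp only [List.foldl_cons, pvStepA, pvIsCons] at hx ⊢
    rw [if_pos hx]
    rw [ih ht' (c + 1) (Nat.max m (c + 1)) (Nat.le_max_right _ _)]
    have h1 : Nat.max (c + 1) (c + 1 + t'.length) = c + 1 + t'.length :=
      Nat.max_eq_right (Nat.le_add_right _ _)
    simp only [List.length_cons, Nat.max_assoc, h1, Prod.mk.injEq]
    exact ⟨by omega, by rw [show c + 1 + t'.length = c + (t'.length + 1) from by omega]⟩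

lemma pvMain : ∀ n (l : List Char), l.length ≤ n → ∀ m : Nat,
    ((l.foldl pvStepA (0, m)).2 ≤ 3 ↔ (m ≤ 3 ∧ pvCheckRuns l = true)) := by
  intro n
  induction n with
  | zero =>
    intro l hl m
    have : l = [] := List.eq_nil_of_length_eq_zero (Nat.le_zero.mp hl)
    subst this; simp [pvCheckRuns]
  | succ n ih =>
    intro l hl m
    cases l with
    | nil => simp [pvCheckRuns]
    | cons c rest =>
      by_cases hc : pvIsCons c = true
      · -- consonant head: walk the whole run
        set t := (c :: rest).takeWhile pvIsCons with htdef
        set d := (c :: rest).dropWhile pvIsCons with hddef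
        have hsplit : t ++ d = c :: rest := List.takeWhile_append_dropWhile
        have htall : ∀ x ∈ t, pvIsCons x = true := fun x hx => List.mem_takeWhile_imp hx
        have htc : t = c :: rest.takeWhile pvIsCons := by simp [htdef, hc]
        have htlen : 1 ≤ t.length := by rw [htc]; simp
        have hlen : t.length + d.length = rest.length + 1 := by
          have := congrArg List.length hsplit; simpa using this
        have hfold : (c :: rest).foldl pvStepA (0, m) =
            d.foldl pvStepA (t.length, Nat.max m t.length) := by
          conv_lhs => rw [← hsplit]
          rw [List.foldl_append, pvRun_fold t htall 0 m (Nat.zero_le m)]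
          simp
        have hnil : pvCheckRuns [] = true := by simp [pvCheckRuns]
        have hcheck : pvCheckRuns (c :: rest) =
            (if 3 < t.length then false else pvCheckRuns d) := by
          rw [pvCheckRuns]; simp [hc, ← htdef, ← hddef]
        cases hd : d with
        | nil =>
          rw [hfold, hcheck, hd]
          simp only [List.foldl_nil]
          rw [Nat.max_le]
          split_ifs with h3
          · simp only [and_false, iff_false]
            rintro ⟨hm, ht3⟩; omega
          · simp [hnil]; omega
        | cons x d' =>
          have hx : pvIsCons x = false := by
            have h2 : (c :: rest).dropWhile pvIsCons ≠ [] := by rw [← hddef, hd]; simp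
            have h3 := List.head_dropWhile_not pvIsCons h2
            simp only [← hddef, hd, List.head_cons] at h3
            exact h3
          have hstep : (x :: d').foldl pvStepA (t.length, Nat.max m t.length) =
              d'.foldl pvStepA (0, Nat.max m t.length) := by
            simp only [pvIsCons] at hx
            simp only [List.foldl_cons, pvStepA]
            rw [if_neg (by rw [hx]; exact Bool.false_ne_true)]
          have hd'len : d'.length ≤ n := by
            simp only [List.length_cons] at hl
            have hdr : d.length ≤ rest.length := by omega
            rw [hd] at hdr; simp only [List.length_cons] at hdr; omega
          have hcheckd : pvCheckRuns d = pvCheckRuns d' := by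
            rw [hd, pvCheckRuns]; simp [hx]
          rw [hfold, hd, hstep, hcheck, hcheckd, ih d' hd'len (Nat.max m t.length)]
          rw [Nat.max_le]
          split_ifs with h3
          · simp only [and_false, iff_false]
            rintro ⟨⟨hm, ht3⟩, hr⟩; omega
          · constructor
            · rintro ⟨⟨hm, ht3⟩, hr⟩; exact ⟨hm, hr⟩
            · rintro ⟨hm, hr⟩; exact ⟨⟨hm, Nat.not_lt.mp h3⟩, hr⟩
      · -- non-consonant head: state resets, recurse
        have hc' : ¬ (pvConsonants.contains c = true) := by simpa [pvIsCons] using hc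
        have hstep : (c :: rest).foldl pvStepA (0, m) = rest.foldl pvStepA (0, m) := by
          simp only [List.foldl_cons, pvStepA]
          rw [if_neg hc']
        have hcheck : pvCheckRuns (c :: rest) = pvCheckRuns rest := by
          rw [pvCheckRuns]
          rw [if_neg hc]
        rw [hstep, hcheck]
        exact ih rest (by simp only [List.length_cons] at hl; omega) m

-- ===== VERDICT (by name: the statement is the Claim_ definition above) =====
theorem is_readable_spec : Claim_equal_is_readable := by
  intro name _
  unfold Spec_is_readable is_readable is_readable_alt
  have h := pvMain name.toList.length name.toList (le_refl _) 0
  simp only [Nat.zero_le, true_and] at h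
  by_cases hb : pvCheckRuns name.toList = true
  · rw [hb]; exact decide_eq_true (h.mpr hb)
  · have hf : pvCheckRuns name.toList = false := Bool.eq_false_iff.mpr hb
    rw [hf]; exact decide_eq_false (fun hle => hb (h.mp hle))
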